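-- pv_equiv track=rewrite | github.com/transitmatters/gobble | scripts/generate_agency_routes.py | build_bus_stops
-- ===== SOURCE A (Python) =====
-- from collections import defaultdict
-- from typing import Dict, Set, Tuple
--
-- def build_bus_stops(
--     routes: Dict[str, Tuple[str, str]],
--     trips: Dict[str, str],
--     trip_stops: Dict[str, Set[str]],
-- ) -> Dict[str, Set[str]]:
--     """
--     Build BUS_STOPS mapping from route_id to set of stop_ids.
--
--     Iterates through all trips and collects all stops for each route.
--     """
--     bus_stops = defaultdict(set)
--     for trip_id, route_id in trips.items():
--         if route_id in routes and trip_id in trip_stops: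
--             bus_stops[route_id].update(trip_stops[trip_id])
--     return dict(bus_stops)
-- ===== SOURCE B (Python) =====
-- from collections import defaultdict
--
-- def build_bus_stops(routes, trips, trip_stops):
--     """Two-pass inverted index: group valid trip_ids per route, then union each
--     route's stop sets in one go."""
--     route_trips = defaultdict(list)
--     for trip_id, route_id in trips.items():
--         if route_id in routes and trip_id in trip_stops:
--             route_trips[route_id].append(trip_id)
--     result = {}
--     for route_id, tlist in route_trips.items():
--         stops = set()
--         for t in tlist:
--             stops.update(trip_stops[t])
--         result[route_id] = stops
--     return result
-- ===== Notes on version B (the rewrite author's own statement) =====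
-- stated objective: alternative
-- what changed: A interleaves everything in one pass, mutating a defaultdict of sets per trip; B first builds an inverted index route_id -> list of valid trip_ids and then, in a separate pass, unions each route's stop sets.
import Mathlib
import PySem

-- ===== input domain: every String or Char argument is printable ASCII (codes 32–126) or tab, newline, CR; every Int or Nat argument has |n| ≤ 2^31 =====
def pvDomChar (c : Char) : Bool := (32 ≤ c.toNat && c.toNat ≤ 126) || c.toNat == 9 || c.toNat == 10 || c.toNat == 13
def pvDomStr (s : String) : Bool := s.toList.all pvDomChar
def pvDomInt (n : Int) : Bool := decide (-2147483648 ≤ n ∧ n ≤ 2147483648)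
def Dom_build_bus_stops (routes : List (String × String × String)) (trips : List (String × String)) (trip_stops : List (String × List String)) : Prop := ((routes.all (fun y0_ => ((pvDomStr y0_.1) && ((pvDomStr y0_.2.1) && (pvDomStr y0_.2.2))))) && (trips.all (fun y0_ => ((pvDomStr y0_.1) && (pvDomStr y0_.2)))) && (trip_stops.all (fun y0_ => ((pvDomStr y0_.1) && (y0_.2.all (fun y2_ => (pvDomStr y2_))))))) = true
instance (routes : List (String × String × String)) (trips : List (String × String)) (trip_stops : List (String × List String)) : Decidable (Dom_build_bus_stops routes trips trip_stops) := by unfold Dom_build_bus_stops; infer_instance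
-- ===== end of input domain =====

-- B replaces A's one-pass interleaved defaultdict-of-sets with a two-pass inverted index
-- (group valid trip_ids per route, then union each route's stop sets); objective: alternative decomposition.

-- ===== PORT A =====
-- single pass over trips; bus_stops[route_id].update(trip_stops[trip_id]) is Dict.modify with default empty set
def build_bus_stops (routes : List (String × String × String)) (trips : List (String × String)) (trip_stops : List (String × List String)) : List (String × List String) :=
  (trips.foldl
    (fun (bus_stops : PySem.Dict String (PySem.Set String)) tp =>
      if routes.any (fun p => p.1 == tp.2) then
        match trip_stops.find? (fun p => p.1 == tp.1) with
        | some q => bus_stops.modify tp.2 PySem.Set.empty (fun s => PySem.Set.update s q.2)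
        | none => bus_stops
      else bus_stops)
    PySem.Dict.empty).items

-- ===== PORT B =====
-- pass 1: inverted index route_id -> list of valid trip_ids; pass 2: union the stop sets per route
def build_bus_stops_alt (routes : List (String × String × String)) (trips : List (String × String)) (trip_stops : List (String × List String)) : List (String × List String) :=
  let route_trips : PySem.Dict String (List String) :=
    trips.foldl
      (fun g tp =>
        if routes.any (fun p => p.1 == tp.2) && (trip_stops.find? (fun p => p.1 == tp.1)).isSome then
          g.modify tp.2 [] (fun tl => tl ++ [tp.1])
        else g)
      PySem.Dict.empty
  route_trips.items.map
    (fun rt => (rt.1, rt.2.foldl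
      (fun (s : PySem.Set String) t =>
        PySem.Set.update s (((trip_stops.find? (fun p => p.1 == t)).map (·.2)).getD []))
      PySem.Set.empty))

-- ===== PRECONDITION & SPEC =====
def Spec_build_bus_stops (routes : List (String × String × String)) (trips : List (String × String)) (trip_stops : List (String × List String)) (out : List (String × List String)) : Prop := out = build_bus_stops_alt routes trips trip_stops
instance (routes : List (String × String × String)) (trips : List (String × String)) (trip_stops : List (String × List String)) (out : List (String × List String)) : Decidable (Spec_build_bus_stops routes trips trip_stops out) := by unfold Spec_build_bus_stops; infer_instance

-- ===== CLAIM (what is proved, stated in full; the proofs are below) =====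
def Claim_equal_build_bus_stops : Prop := ∀ (routes : List (String × String × String)) (trips : List (String × String)) (trip_stops : List (String × List String)), Dom_build_bus_stops routes trips trip_stops → Spec_build_bus_stops routes trips trip_stops (build_bus_stops routes trips trip_stops)

-- ===== LEMMAS AND PROOFS =====

-- the stop list Python reads as trip_stops[t] (first match; [] never used when find? succeeds)
def pvTs (trip_stops : List (String × List String)) (t : String) : List String :=
  ((trip_stops.find? (fun p => p.1 == t)).map (·.2)).getD []

-- the stop set B builds for one route from its trip list
def pvH (trip_stops : List (String × List String)) (tl : List String) : PySem.Set String :=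
  tl.foldl (fun s t => PySem.Set.update s (pvTs trip_stops t)) PySem.Set.empty

def pvEnt (trip_stops : List (String × List String)) : String × List String → String × PySem.Set String :=
  fun rt => (rt.1, pvH trip_stops rt.2)

-- "finish B's second pass now": the stop-set dict corresponding to a trip index
def pvF (trip_stops : List (String × List String)) (g : PySem.Dict String (List String)) : PySem.Dict String (PySem.Set String) :=
  PySem.Dict.mk (g.items.map (pvEnt trip_stops))

theorem pv_get?_F (trip_stops : List (String × List String)) (g : PySem.Dict String (List String)) (k : String) :
    (pvF trip_stops g).get? k = (g.get? k).map (pvH trip_stops) := by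
  simp only [pvF, PySem.Dict.get?, List.find?_map]
  have : ((fun p : String × PySem.Set String => p.1 == k) ∘ pvEnt trip_stops)
      = fun rt : String × List String => rt.1 == k := by
    funext rt; rfl
  rw [this]
  cases g.items.find? (fun rt => rt.1 == k) <;> rfl

theorem pv_contains_F (trip_stops : List (String × List String)) (g : PySem.Dict String (List String)) (k : String) :
    (pvF trip_stops g).contains k = g.contains k := by
  simp only [pvF, PySem.Dict.contains, List.any_map]
  have : ((fun p : String × PySem.Set String => p.1 == k) ∘ pvEnt trip_stops)
      = fun rt : String × List String => rt.1 == k := by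
    funext rt; rfl
  rw [this]

theorem pv_insert_F (trip_stops : List (String × List String)) (g : PySem.Dict String (List String)) (k : String) (v : List String) :
    pvF trip_stops (g.insert k v) = (pvF trip_stops g).insert k (pvH trip_stops v) := by
  apply PySem.Dict.ext
  simp only [PySem.Dict.insert, pv_contains_F]
  by_cases h : g.contains k = true
  · simp only [h, if_true, pvF, List.map_map]
    apply List.map_congr_left
    intro p _
    by_cases hp : p.1 = k <;> simp [pvEnt, hp]
  · simp [h, pvF, pvEnt]

theorem pv_modify_comm (trip_stops : List (String × List String)) (g : PySem.Dict String (List String)) (k t : String) :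
    (pvF trip_stops g).modify k PySem.Set.empty (fun s => PySem.Set.update s (pvTs trip_stops t))
      = pvF trip_stops (g.modify k [] (fun tl => tl ++ [t])) := by
  simp only [PySem.Dict.modify, PySem.Dict.getD, pv_get?_F, pv_insert_F]
  congr 1
  cases hg : g.get? k with
  | none => simp [pvH]
  | some tl => simp [pvH, List.foldl_append]

theorem pv_main (routes : List (String × String × String)) (trip_stops : List (String × List String)) :
    ∀ (l : List (String × String)) (g : PySem.Dict String (List String)),
      l.foldl
        (fun (bus_stops : PySem.Dict String (PySem.Set String)) tp =>
          if routes.any (fun p => p.1 == tp.2) then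
            match trip_stops.find? (fun p => p.1 == tp.1) with
            | some q => bus_stops.modify tp.2 PySem.Set.empty (fun s => PySem.Set.update s q.2)
            | none => bus_stops
          else bus_stops)
        (pvF trip_stops g)
      = pvF trip_stops
          (l.foldl
            (fun g tp =>
              if routes.any (fun p => p.1 == tp.2) && (trip_stops.find? (fun p => p.1 == tp.1)).isSome then
                g.modify tp.2 [] (fun tl => tl ++ [tp.1])
              else g)
            g) := by
  intro l
  induction l with
  | nil => intro g; rfl
  | cons tp rest ih =>
    intro g
    simp only [List.foldl_cons]
    by_cases hr : routes.any (fun p => p.1 == tp.2) = true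
    · cases hfind : trip_stops.find? (fun p => p.1 == tp.1) with
      | none =>
        simp only [hr]
        exact ih g
      | some q =>
        have hts : q.2 = pvTs trip_stops tp.1 := by simp [pvTs, hfind]
        simp only [hr, hts, pv_modify_comm]
        exact ih _
    · simp only [hr, Bool.false_and]
      exact ih g

-- ===== VERDICT (by name: the statement is the Claim_ definition above) =====
theorem build_bus_stops_spec : Claim_equal_build_bus_stops := by
  intro routes trips trip_stops _
  unfold Spec_build_bus_stops build_bus_stops build_bus_stops_alt
  have h0 : (PySem.Dict.empty : PySem.Dict String (PySem.Set String)) = pvF trip_stops PySem.Dict.empty := rfl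
  rw [h0, pv_main routes trip_stops trips PySem.Dict.empty]
  rfl
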